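-- pv_equiv track=rewrite | github.com/Prasanna030/Plivo-NER | src/predict.py | expand_numeric_span
-- ===== SOURCE A (Python) =====
-- DIGIT_WORDS = {
--     "zero", "one", "two", "three", "four",
--     "five", "six", "seven", "eight", "nine"
-- }
--
-- def _token_left(text: str, idx: int):
--     j = idx - 1
--     while j >= 0 and text[j].isspace():
--         j -= 1
--     if j < 0:
--         return None, idx
--     end = j + 1
--     while j >= 0 and not text[j].isspace():
--         j -= 1
--     start = j + 1
--     return text[start:end], start
--
-- def _token_right(text: str, idx: int):
--     n = len(text)
--     j = idx
--     while j < n and text[j].isspace():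
--         j += 1
--     if j >= n:
--         return None, idx
--     start = j
--     while j < n and not text[j].isspace():
--         j += 1
--     end = j
--     return text[start:end], end
--
-- def _is_digit_like(token: str) -> bool:
--     clean = ''.join(ch for ch in token.lower() if ch.isalnum())
--     return bool(clean) and (clean.isdigit() or clean in DIGIT_WORDS)
--
-- def expand_numeric_span(text: str, start: int, end: int) -> tuple[int, int]:
--     changed = True
--     while changed:
--         changed = False
--         token, new_start = _token_left(text, start)
--         if token and _is_digit_like(token):
--             start = new_start
--             changed = True
--             continue
--         token, new_end = _token_right(text, end)
--         if token and _is_digit_like(token):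
--             end = new_end
--             changed = True
--     return start, end
-- ===== SOURCE B (Python) =====
-- DIGIT_WORDS = {
--     "zero", "one", "two", "three", "four",
--     "five", "six", "seven", "eight", "nine"
-- }
--
-- def _is_digit_like(token: str) -> bool:
--     clean = ''.join(ch for ch in token.lower() if ch.isalnum())
--     return bool(clean) and (clean.isdigit() or clean in DIGIT_WORDS)
--
-- def _token_spans(text: str):
--     """One pass: (start, end) of every maximal non-space run."""
--     spans = []
--     ts = None
--     for i, ch in enumerate(text):
--         if ch.isspace():
--             if ts is not None:
--                 spans.append((ts, i))
--                 ts = None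
--         else:
--             if ts is None:
--                 ts = i
--     if ts is not None:
--         spans.append((ts, len(text)))
--     return spans
--
-- def expand_numeric_span(text: str, start: int, end: int) -> tuple[int, int]:
--     spans = _token_spans(text)
--     # walk left over the span table
--     for ts, te in reversed(spans):
--         if ts >= start:
--             continue
--         if _is_digit_like(text[ts:min(te, start)]):
--             start = ts
--         else:
--             break
--     # walk right over the span table
--     for ts, te in spans:
--         if te <= end:
--             continue
--         if _is_digit_like(text[max(ts, end):te]):
--             end = te
--         else:
--             break
--     return start, end
-- ===== Notes on version B (the rewrite author's own statement) =====
-- stated objective: alternative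
-- what changed: B replaces A's repeated backward/forward character rescans driven by a changed-flag while loop with a single tokenization pass that builds a span table (start,end of every maximal non-space run) and then walks that table once leftward and once rightward.
-- outside the precondition, e.g. on expand_numeric_span('1n1', -6, -1): A returns (-6, 3), B returns (-6, -1); on expand_numeric_span(' 5', 0, -2): A returns (0, -2), B returns (0, 2)
import Mathlib
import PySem

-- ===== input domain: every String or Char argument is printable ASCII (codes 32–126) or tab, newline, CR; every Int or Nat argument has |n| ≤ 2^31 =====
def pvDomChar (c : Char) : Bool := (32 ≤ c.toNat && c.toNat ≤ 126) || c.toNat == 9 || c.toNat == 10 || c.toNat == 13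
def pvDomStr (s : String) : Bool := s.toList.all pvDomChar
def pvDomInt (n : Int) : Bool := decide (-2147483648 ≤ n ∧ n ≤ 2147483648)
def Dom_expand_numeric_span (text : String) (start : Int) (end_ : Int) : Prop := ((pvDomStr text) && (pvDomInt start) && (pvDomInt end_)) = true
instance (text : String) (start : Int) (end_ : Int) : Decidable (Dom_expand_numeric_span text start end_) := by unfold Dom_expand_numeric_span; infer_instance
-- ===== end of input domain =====

-- B replaces A's repeated character rescans with one tokenization pass building a span
-- table that is then walked once per side (objective: alternative data structure, same cost).


-- ===== PORT A =====

-- helpers shared by both ports (the same-module context of A, reused verbatim by B)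
def pvDigitWords : List (List Char) :=
  [['z','e','r','o'], ['o','n','e'], ['t','w','o'], ['t','h','r','e','e'], ['f','o','u','r'],
   ['f','i','v','e'], ['s','i','x'], ['s','e','v','e','n'], ['e','i','g','h','t'], ['n','i','n','e']]

-- _is_digit_like: clean = ''.join(ch for ch in token.lower() if ch.isalnum()); bool(clean) and (clean.isdigit() or clean in DIGIT_WORDS)
def pvIsDigitLike (t : List Char) : Bool :=
  let clean := (PySem.Chars.lower t).filter PySem.Chars.isalnum
  !clean.isEmpty && (PySem.Chars.strIsdigit clean || pvDigitWords.contains clean)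

-- text[j].isspace() read through Python indexing (false where Python would raise; Pre_ keeps indices in range)
def pvIsSpaceAt (cs : List Char) (j : Int) : Bool :=
  match PySem.List.pyGet? cs j with
  | some c => PySem.Chars.isspace c
  | none => false

-- while j >= 0 and text[j].isspace(): j -= 1
def pvSkipSpaceL (cs : List Char) (j : Int) : Int :=
  if h : 0 ≤ j ∧ pvIsSpaceAt cs j then pvSkipSpaceL cs (j - 1) else j
termination_by (j + 1).toNat
decreasing_by omega

-- while j >= 0 and not text[j].isspace(): j -= 1
def pvSkipNonSpaceL (cs : List Char) (j : Int) : Int :=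
  if h : 0 ≤ j ∧ ¬ pvIsSpaceAt cs j then pvSkipNonSpaceL cs (j - 1) else j
termination_by (j + 1).toNat
decreasing_by omega

-- _token_left
def pvTokenLeft (cs : List Char) (idx : Int) : Option (List Char) × Int :=
  let j := pvSkipSpaceL cs (idx - 1)
  if j < 0 then (none, idx)
  else
    let e := j + 1
    let s := pvSkipNonSpaceL cs j + 1
    (some (PySem.List.slice cs (some s) (some e)), s)

-- while j < n and text[j].isspace(): j += 1
def pvSkipSpaceR (cs : List Char) (j : Int) : Int :=
  if h : j < (cs.length : Int) ∧ pvIsSpaceAt cs j then pvSkipSpaceR cs (j + 1) else j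
termination_by ((cs.length : Int) - j).toNat
decreasing_by omega

-- while j < n and not text[j].isspace(): j += 1
def pvSkipNonSpaceR (cs : List Char) (j : Int) : Int :=
  if h : j < (cs.length : Int) ∧ ¬ pvIsSpaceAt cs j then pvSkipNonSpaceR cs (j + 1) else j
termination_by ((cs.length : Int) - j).toNat
decreasing_by omega

-- _token_right
def pvTokenRight (cs : List Char) (idx : Int) : Option (List Char) × Int :=
  let j := pvSkipSpaceR cs idx
  if (cs.length : Int) ≤ j then (none, idx)
  else
    let s := j
    let e := pvSkipNonSpaceR cs j
    (some (PySem.List.slice cs (some s) (some e)), e)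

-- "if token and _is_digit_like(token)" (Python truthiness of the str, then the predicate)
def pvTokTruthyDigit : Option (List Char) → Bool
  | none => false
  | some t => !t.isEmpty && pvIsDigitLike t

-- the changed-flag while loop of A, fueled (fuel 2*len+3 provably suffices on Pre_)
def pvLoopA (cs : List Char) : Nat → Int → Int → Int × Int
  | 0, s, e => (s, e)
  | fuel + 1, s, e =>
    let L := pvTokenLeft cs s
    if pvTokTruthyDigit L.1 then pvLoopA cs fuel L.2 e
    else
      let R := pvTokenRight cs e
      if pvTokTruthyDigit R.1 then pvLoopA cs fuel s R.2
      else (s, e)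

def expand_numeric_span (text : String) (start : Int) (end_ : Int) : Int × Int :=
  pvLoopA text.toList (2 * text.toList.length + 3) start end_

-- ===== PORT B =====

-- one step of the tokenizing fold over enumerate(text) in Source B's _token_spans
def pvStep (st : List (Int × Int) × Option Int) (p : Int × Char) : List (Int × Int) × Option Int :=
  if PySem.Chars.isspace p.2 then
    match st.2 with
    | some ts => (st.1 ++ [(ts, p.1)], none)
    | none => (st.1, none)
  else
    match st.2 with
    | some _ => st
    | none => (st.1, some p.1)

def pvTokenSpans (cs : List Char) : List (Int × Int) :=
  let st := (PySem.List.enumerate cs).foldl pvStep ([], none)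
  match st.2 with
  | some ts => st.1 ++ [(ts, (cs.length : Int))]
  | none => st.1

-- for ts, te in reversed(spans): …
def pvLeftWalk (cs : List Char) : List (Int × Int) → Int → Int
  | [], s => s
  | (ts, te) :: rest, s =>
    if ts ≥ s then pvLeftWalk cs rest s
    else if pvIsDigitLike (PySem.List.slice cs (some ts) (some (min te s))) then pvLeftWalk cs rest ts
    else s

-- for ts, te in spans: …
def pvRightWalk (cs : List Char) : List (Int × Int) → Int → Int
  | [], e => e
  | (ts, te) :: rest, e =>
    if te ≤ e then pvRightWalk cs rest e
    else if pvIsDigitLike (PySem.List.slice cs (some (max ts e)) (some te)) then pvRightWalk cs rest te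
    else e

def expand_numeric_span_alt (text : String) (start : Int) (end_ : Int) : Int × Int :=
  let cs := text.toList
  let spans := pvTokenSpans cs
  (pvLeftWalk cs spans.reverse start, pvRightWalk cs spans end_)

-- ===== PRECONDITION & SPEC =====

-- Pre_ restricts to the natural domain of a span end over text: start ≤ len(text) and 0 ≤ end.
-- Excluded: start > len(text), where A raises IndexError, and negative end, where A's result
-- follows Python's accidental negative-index wraparound (B does the natural thing there).
def Pre_expand_numeric_span (text : String) (start : Int) (end_ : Int) : Prop :=
  start ≤ (text.toList.length : Int) ∧ 0 ≤ end_
instance (text : String) (start : Int) (end_ : Int) : Decidable (Pre_expand_numeric_span text start end_) := by unfold Pre_expand_numeric_span; infer_instance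

def pvWitness_expand_numeric_span : String × Int × Int := ("no 12 one x", 3, 4)

def Spec_expand_numeric_span (text : String) (start : Int) (end_ : Int) (out : Int × Int) : Prop := out = expand_numeric_span_alt text start end_
instance (text : String) (start : Int) (end_ : Int) (out : Int × Int) : Decidable (Spec_expand_numeric_span text start end_ out) := by unfold Spec_expand_numeric_span; infer_instance

-- ===== CLAIM (what is proved, stated in full; the proofs are below) =====
def Claim_equal_expand_numeric_span : Prop := ∀ (text : String) (start : Int) (end_ : Int), Dom_expand_numeric_span text start end_ → Pre_expand_numeric_span text start end_ → Spec_expand_numeric_span text start end_ (expand_numeric_span text start end_)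


-- ===== LEMMAS AND PROOFS =====

-- character classification at a Nat index (false out of range)
def pvSpaceAt (cs : List Char) (i : Nat) : Bool :=
  match cs[i]? with
  | some c => PySem.Chars.isspace c
  | none => false

theorem pvIsSpaceAt_eq (cs : List Char) (j : Int) (h : 0 ≤ j) :
    pvIsSpaceAt cs j = pvSpaceAt cs j.toNat := by
  rw [pvIsSpaceAt, pvSpaceAt, PySem.List.pyGet?_of_nonneg cs h]

theorem pvSpaceAt_append_lt (p : List Char) (c : Char) (i : Nat) (h : i < p.length) :
    pvSpaceAt (p ++ [c]) i = pvSpaceAt p i := by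
  simp [pvSpaceAt, List.getElem?_append_left h]

theorem pvSpaceAt_append_self (p : List Char) (c : Char) :
    pvSpaceAt (p ++ [c]) p.length = PySem.Chars.isspace c := by
  simp [pvSpaceAt]

-- determination lemmas for the four scans
theorem pvSkipSpaceL_eq (cs : List Char) (j t : Int) (h1 : -1 ≤ t) (h2 : t ≤ j)
    (hmid : ∀ i : Nat, t < (i : Int) → (i : Int) ≤ j → pvSpaceAt cs i = true)
    (hstop : t = -1 ∨ (0 ≤ t ∧ pvSpaceAt cs t.toNat = false)) :
    pvSkipSpaceL cs j = t := by
  rcases eq_or_lt_of_le h2 with rfl | hlt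
  · rw [pvSkipSpaceL]
    rcases hstop with rfl | ⟨h0, hs⟩
    · simp
    · rw [dif_neg]; rintro ⟨_, hsp⟩
      rw [pvIsSpaceAt_eq cs t h0, hs] at hsp; exact absurd hsp (by simp)
  · have hj0 : 0 ≤ j := by omega
    have hsj : pvSpaceAt cs j.toNat = true := by
      apply hmid <;> omega
    rw [pvSkipSpaceL, dif_pos ⟨hj0, by rw [pvIsSpaceAt_eq cs j hj0]; exact hsj⟩]
    exact pvSkipSpaceL_eq cs (j - 1) t h1 (by omega)
      (fun i hi1 hi2 => hmid i hi1 (by omega)) hstop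
termination_by (j - t).toNat
decreasing_by omega

theorem pvSkipNonSpaceL_eq (cs : List Char) (j t : Int) (h1 : -1 ≤ t) (h2 : t ≤ j)
    (hmid : ∀ i : Nat, t < (i : Int) → (i : Int) ≤ j → pvSpaceAt cs i = false)
    (hstop : t = -1 ∨ (0 ≤ t ∧ pvSpaceAt cs t.toNat = true)) :
    pvSkipNonSpaceL cs j = t := by
  rcases eq_or_lt_of_le h2 with rfl | hlt
  · rw [pvSkipNonSpaceL]
    rcases hstop with rfl | ⟨h0, hs⟩
    · simp
    · rw [dif_neg]; rintro ⟨_, hsp⟩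
      rw [pvIsSpaceAt_eq cs t h0, hs] at hsp; exact hsp rfl
  · have hj0 : 0 ≤ j := by omega
    have hsj : pvSpaceAt cs j.toNat = false := by
      apply hmid <;> omega
    rw [pvSkipNonSpaceL, dif_pos ⟨hj0, by rw [pvIsSpaceAt_eq cs j hj0, hsj]; simp⟩]
    exact pvSkipNonSpaceL_eq cs (j - 1) t h1 (by omega)
      (fun i hi1 hi2 => hmid i hi1 (by omega)) hstop
termination_by (j - t).toNat
decreasing_by omega

theorem pvSkipSpaceR_eq (cs : List Char) (j t : Int) (h0 : 0 ≤ j) (h2 : j ≤ t)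
    (h3 : t ≤ (cs.length : Int))
    (hmid : ∀ i : Nat, j ≤ (i : Int) → (i : Int) < t → pvSpaceAt cs i = true)
    (hstop : t = (cs.length : Int) ∨ pvSpaceAt cs t.toNat = false) :
    pvSkipSpaceR cs j = t := by
  rcases eq_or_lt_of_le h2 with heq | hlt
  · rw [pvSkipSpaceR, dif_neg]
    · exact heq
    · rintro ⟨hlt', hsp⟩
      rcases hstop with hT | hs
      · omega
      · rw [heq] at hsp
        rw [pvIsSpaceAt_eq cs t (by omega), hs] at hsp
        exact absurd hsp (by simp)
  · have hsj : pvSpaceAt cs j.toNat = true := by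
      apply hmid <;> omega
    rw [pvSkipSpaceR, dif_pos ⟨by omega, by rw [pvIsSpaceAt_eq cs j h0]; exact hsj⟩]
    exact pvSkipSpaceR_eq cs (j + 1) t (by omega) (by omega) h3
      (fun i hi1 hi2 => hmid i (by omega) hi2) hstop
termination_by (t - j).toNat
decreasing_by omega

theorem pvSkipNonSpaceR_eq (cs : List Char) (j t : Int) (h0 : 0 ≤ j) (h2 : j ≤ t)
    (h3 : t ≤ (cs.length : Int))
    (hmid : ∀ i : Nat, j ≤ (i : Int) → (i : Int) < t → pvSpaceAt cs i = false)
    (hstop : t = (cs.length : Int) ∨ pvSpaceAt cs t.toNat = true) :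
    pvSkipNonSpaceR cs j = t := by
  rcases eq_or_lt_of_le h2 with heq | hlt
  · rw [pvSkipNonSpaceR, dif_neg]
    · exact heq
    · rintro ⟨hlt', hsp⟩
      rcases hstop with hT | hs
      · omega
      · rw [heq] at hsp
        rw [pvIsSpaceAt_eq cs t (by omega), hs] at hsp
        exact hsp rfl
  · have hsj : pvSpaceAt cs j.toNat = false := by
      apply hmid <;> omega
    rw [pvSkipNonSpaceR, dif_pos ⟨by omega, by rw [pvIsSpaceAt_eq cs j h0, hsj]; simp⟩]
    exact pvSkipNonSpaceR_eq cs (j + 1) t (by omega) (by omega) h3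
      (fun i hi1 hi2 => hmid i (by omega) hi2) hstop
termination_by (t - j).toNat
decreasing_by omega


-- the fold state of B's tokenizer
def pvStState (cs : List Char) : List (Int × Int) × Option Int :=
  (PySem.List.enumerate cs).foldl pvStep ([], none)

theorem pvStState_snoc (p : List Char) (c : Char) :
    pvStState (p ++ [c]) = pvStep (pvStState p) ((p.length : Int), c) := by
  unfold pvStState
  rw [PySem.List.enumerate_append, List.foldl_append]
  simp [PySem.List.enumerate_cons, PySem.List.enumerate_nil]

theorem pvTokenSpans_eq_st (cs : List Char) :
    pvTokenSpans cs = (match (pvStState cs).2 with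
      | some ts => (pvStState cs).1 ++ [(ts, (cs.length : Int))]
      | none => (pvStState cs).1) := rfl

-- the span-table invariant
def pvInv (cs : List Char) : Prop :=
  (∀ q ∈ pvTokenSpans cs, 0 ≤ q.1 ∧ q.1 < q.2 ∧ q.2 ≤ (cs.length : Int)) ∧
  (pvTokenSpans cs).Pairwise (fun a b => a.2 < b.1) ∧
  (∀ q ∈ pvTokenSpans cs, ∀ i : Nat, q.1 ≤ (i : Int) → (i : Int) < q.2 → pvSpaceAt cs i = false) ∧
  (∀ q ∈ pvTokenSpans cs, 1 ≤ q.1 → pvSpaceAt cs (q.1 - 1).toNat = true) ∧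
  (∀ q ∈ pvTokenSpans cs, q.2 < (cs.length : Int) → pvSpaceAt cs q.2.toNat = true) ∧
  (∀ i : Nat, i < cs.length → pvSpaceAt cs i = false →
     ∃ q ∈ pvTokenSpans cs, q.1 ≤ (i : Int) ∧ (i : Int) < q.2) ∧
  ((pvTokenSpans cs).length ≤ cs.length + 1)

def pvOpenOK (cs : List Char) : Prop :=
  (pvStState cs).2 = none → cs = [] ∨ pvSpaceAt cs (cs.length - 1) = true

theorem pvInv_all (cs : List Char) : pvInv cs ∧ pvOpenOK cs := by
  induction cs using List.reverseRecOn with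
  | nil =>
    constructor
    · refine ⟨?_, ?_, ?_, ?_, ?_, ?_, ?_⟩ <;> simp [pvTokenSpans, PySem.List.enumerate_nil]
    · intro _; left; rfl
  | append_singleton p c ih =>
    obtain ⟨⟨i1, i2, i3, i4, i5, i6, i7⟩, iOpen⟩ := ih
    have hst := pvStState_snoc p c
    have hlen : ((p ++ [c]).length : Int) = (p.length : Int) + 1 := by simp
    by_cases hc : PySem.Chars.isspace c = true
    · -- appended char is a space
      have hspans : pvTokenSpans (p ++ [c]) = pvTokenSpans p := by
        rw [pvTokenSpans_eq_st, hst, pvTokenSpans_eq_st (cs := p)]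
        cases ho : (pvStState p).2 <;> simp [pvStep, hc, ho]
      have hq2lt : ∀ q ∈ pvTokenSpans p, q.2 ≤ (p.length : Int) := fun q hq => (i1 q hq).2.2
      have hsame : ∀ q ∈ pvTokenSpans p, ∀ i : Nat, q.1 ≤ (i : Int) → (i : Int) < q.2 →
          pvSpaceAt (p ++ [c]) i = pvSpaceAt p i := by
        intro q hq i hi1 hi2
        have := (i1 q hq).2.2
        exact pvSpaceAt_append_lt p c i (by omega)
      constructor
      · refine ⟨?_, ?_, ?_, ?_, ?_, ?_, ?_⟩
        · intro q hq; rw [hspans] at hq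
          have := i1 q hq; simp only [hlen]; exact ⟨this.1, this.2.1, by omega⟩
        · rw [hspans]; exact i2
        · intro q hq i hi1 hi2; rw [hspans] at hq
          rw [hsame q hq i hi1 hi2]; exact i3 q hq i hi1 hi2
        · intro q hq hq1; rw [hspans] at hq
          have h1 := (i1 q hq).1
          rw [pvSpaceAt_append_lt p c _ (by have := (i1 q hq).2.1; have := (i1 q hq).2.2; omega)]
          exact i4 q hq hq1
        · intro q hq hq2; rw [hspans] at hq
          rcases lt_or_eq_of_le ((i1 q hq).2.2) with h | h
          · rw [pvSpaceAt_append_lt p c _ (by have := (i1 q hq).1; have := (i1 q hq).2.1; omega)]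
            exact i5 q hq h
          · have : q.2.toNat = p.length := by have := (i1 q hq).1; have := (i1 q hq).2.1; omega
            rw [this, pvSpaceAt_append_self]; exact hc
        · intro i hi hns
          rw [List.length_append, List.length_singleton] at hi
          rcases lt_or_eq_of_le (Nat.lt_succ_iff.mp hi) with h | h
          · rw [pvSpaceAt_append_lt p c i h] at hns
            obtain ⟨q, hq, hqi⟩ := i6 i h hns
            exact ⟨q, by rw [hspans]; exact hq, hqi⟩
          · exfalso; rw [h, pvSpaceAt_append_self] at hns
            rw [hc] at hns; exact absurd hns (by simp)
        · rw [hspans]; simp; omega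
      · intro _; right
        have : (p ++ [c]).length - 1 = p.length := by simp
        rw [this, pvSpaceAt_append_self]; exact hc
    · -- appended char is not a space
      have hcf : PySem.Chars.isspace c = false := by
        cases h : PySem.Chars.isspace c
        · rfl
        · exact absurd h hc
      -- the new last span: either the open one extended, or a fresh length-one span
      obtain ⟨sp, ts', hq, hb0, hb1, hcase⟩ :
          ∃ sp ts', pvTokenSpans (p ++ [c]) = sp ++ [(ts', (p.length : Int) + 1)] ∧
            0 ≤ ts' ∧ ts' ≤ (p.length : Int) ∧
            (pvTokenSpans p = sp ++ [(ts', (p.length : Int))] ∨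
             (pvTokenSpans p = sp ∧ ts' = (p.length : Int) ∧
              (p = [] ∨ pvSpaceAt p (p.length - 1) = true))) := by
        cases ho : (pvStState p).2 with
        | some ts =>
          have hsp : pvTokenSpans p = (pvStState p).1 ++ [(ts, (p.length : Int))] := by
            rw [pvTokenSpans_eq_st, ho]
          have hsq : pvTokenSpans (p ++ [c]) = (pvStState p).1 ++ [(ts, (p.length : Int) + 1)] := by
            rw [pvTokenSpans_eq_st, hst]
            simp [pvStep, hcf, ho]
          have hb := i1 (ts, (p.length : Int)) (by rw [hsp]; simp)
          exact ⟨(pvStState p).1, ts, hsq, hb.1, by have := hb.2.1; simp at this; omega, Or.inl hsp⟩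
        | none =>
          have hsp : pvTokenSpans p = (pvStState p).1 := by rw [pvTokenSpans_eq_st, ho]
          have hsq : pvTokenSpans (p ++ [c]) = (pvStState p).1 ++ [((p.length : Int), (p.length : Int) + 1)] := by
            rw [pvTokenSpans_eq_st, hst]
            simp [pvStep, hcf, ho]
          exact ⟨(pvStState p).1, (p.length : Int), hsq, by positivity, le_refl _,
            Or.inr ⟨hsp, rfl, iOpen ho⟩⟩
      -- facts about the earlier spans sp
      have hsp_mem : ∀ q ∈ sp, q ∈ pvTokenSpans p := by
        rcases hcase with h | ⟨h, _⟩ <;> intro q hq <;> rw [h]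
        · exact List.mem_append_left _ hq
        · exact hq
      have hsp_b : ∀ q ∈ sp, 0 ≤ q.1 ∧ q.1 < q.2 ∧ q.2 ≤ (p.length : Int) :=
        fun q hq => i1 q (hsp_mem q hq)
      have hsp_lt : ∀ q ∈ sp, q.2 < ts' := by
        rcases hcase with h | ⟨h, hts, hop⟩
        · intro q hq
          have := (List.pairwise_append.mp (h ▸ i2)).2.2 q hq (ts', (p.length : Int)) (by simp)
          exact this
        · intro q hq
          have hb := hsp_b q hq
          rcases lt_or_eq_of_le hb.2.2 with hlt | heq
          · omega
          · exfalso
            have hple : 1 ≤ p.length := by omega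
            rcases hop with rfl | hsp1
            · simp at hple
            · have := i3 q (hsp_mem q hq) (p.length - 1) (by omega) (by omega)
              rw [this] at hsp1; exact absurd hsp1 (by simp)
      have hsp_pw : sp.Pairwise (fun a b => a.2 < b.1) := by
        rcases hcase with h | ⟨h, _⟩
        · exact (List.pairwise_append.mp (h ▸ i2)).1
        · exact h ▸ i2
      have hts_left : 1 ≤ ts' → pvSpaceAt p (ts' - 1).toNat = true := by
        rcases hcase with h | ⟨h, hts, hop⟩
        · exact fun h1 => i4 (ts', (p.length : Int)) (by rw [h]; simp) h1
        · intro h1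
          rcases hop with rfl | hsp1
          · simp at hts; omega
          · have : (ts' - 1).toNat = p.length - 1 := by omega
            rw [this]; exact hsp1
      have hts_inside : ∀ i : Nat, ts' ≤ (i : Int) → (i : Int) < (p.length : Int) → pvSpaceAt p i = false := by
        rcases hcase with h | ⟨h, hts, _⟩
        · exact fun i hi1 hi2 => i3 (ts', (p.length : Int)) (by rw [h]; simp) i hi1 hi2
        · intro i hi1 hi2; omega
      have hcov_old : ∀ i : Nat, i < p.length → pvSpaceAt p i = false →
          (∃ q ∈ sp, q.1 ≤ (i : Int) ∧ (i : Int) < q.2) ∨ ts' ≤ (i : Int) := by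
        intro i hi hns
        obtain ⟨q, hqmem, hqi⟩ := i6 i hi hns
        rcases hcase with h | ⟨h, hts, _⟩
        · rw [h] at hqmem
          rcases List.mem_append.mp hqmem with hq | hq
          · exact Or.inl ⟨q, hq, hqi⟩
          · simp at hq; subst hq; exact Or.inr hqi.1
        · exact Or.inl ⟨q, h ▸ hqmem, hqi⟩
      have hlen_sp : sp.length ≤ p.length + 1 := by
        rcases hcase with h | ⟨h, _⟩
        · have := i7; rw [h] at this; simp at this; omega
        · have := i7; rw [h] at this; omega
      have hmemq : ∀ q, q ∈ pvTokenSpans (p ++ [c]) ↔ (q ∈ sp ∨ q = (ts', (p.length : Int) + 1)) := by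
        intro q; rw [hq]; simp
      constructor
      · refine ⟨?_, ?_, ?_, ?_, ?_, ?_, ?_⟩
        · intro q hqm
          rcases (hmemq q).mp hqm with h | rfl
          · have := hsp_b q h; rw [hlen]; exact ⟨this.1, this.2.1, by omega⟩
          · rw [hlen]; exact ⟨hb0, by omega, le_refl _⟩
        · rw [hq]
          refine List.pairwise_append.mpr ⟨hsp_pw, by simp, ?_⟩
          intro a ha b hb; simp at hb; rw [hb]
          exact hsp_lt a ha
        · intro q hqm i hi1 hi2
          rcases (hmemq q).mp hqm with h | rfl
          · have hb := hsp_b q h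
            rw [pvSpaceAt_append_lt p c i (by omega)]
            exact i3 q (hsp_mem q h) i hi1 hi2
          · simp only at hi1 hi2
            rcases lt_or_eq_of_le (Nat.lt_succ_iff.mp (by omega : i < p.length + 1)) with h | h
            · rw [pvSpaceAt_append_lt p c i h]
              exact hts_inside i hi1 (by omega)
            · rw [h, pvSpaceAt_append_self]; exact hcf
        · intro q hqm h1
          rcases (hmemq q).mp hqm with h | rfl
          · have hb := hsp_b q h
            rw [pvSpaceAt_append_lt p c _ (by omega)]
            exact i4 q (hsp_mem q h) h1
          · simp only at h1 ⊢
            rw [pvSpaceAt_append_lt p c _ (by omega)]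
            exact hts_left h1
        · intro q hqm h2
          rcases (hmemq q).mp hqm with h | rfl
          · have hb := hsp_b q h
            have hlt := hsp_lt q h
            rw [pvSpaceAt_append_lt p c _ (by omega)]
            exact i5 q (hsp_mem q h) (by omega)
          · exfalso; rw [hlen] at h2; simp at h2
        · intro i hi hns
          rw [List.length_append, List.length_singleton] at hi
          rcases lt_or_eq_of_le (Nat.lt_succ_iff.mp hi) with h | h
          · rw [pvSpaceAt_append_lt p c i h] at hns
            rcases hcov_old i h hns with ⟨q, hqm, hqi⟩ | hge
            · exact ⟨q, (hmemq q).mpr (Or.inl hqm), hqi⟩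
            · exact ⟨(ts', (p.length : Int) + 1), (hmemq _).mpr (Or.inr rfl), hge, by simp; omega⟩
          · exact ⟨(ts', (p.length : Int) + 1), (hmemq _).mpr (Or.inr rfl), by simp [h]; omega, by simp [h]⟩
        · rw [hq]; simp; omega
      · intro hnone
        rw [hst] at hnone
        cases ho : (pvStState p).2 <;> simp [pvStep, hcf, ho] at hnone


theorem pvBoolFalse {b : Bool} (h : ¬ b = true) : b = false := by
  cases b
  · rfl
  · exact absurd rfl h

theorem pvTokenLeft_eq (cs : List Char) (hInv : pvInv cs) (idx : Int)
    (hn : idx ≤ (cs.length : Int)) :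
    pvTokenLeft cs idx = (match (pvTokenSpans cs).reverse.find? (fun q => decide (q.1 < idx)) with
      | none => (none, idx)
      | some q => (some (PySem.List.slice cs (some q.1) (some (min q.2 idx))), q.1)) := by
  obtain ⟨i1, i2, i3, i4, i5, i6, i7⟩ := hInv
  cases hf : (pvTokenSpans cs).reverse.find? (fun q => decide (q.1 < idx)) with
  | none =>
    have hall : ∀ q ∈ pvTokenSpans cs, idx ≤ q.1 := by
      intro q hqm
      have := List.find?_eq_none.mp hf q (List.mem_reverse.mpr hqm)
      simp at this; omega
    by_cases h0 : 0 ≤ idx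
    · have hj : pvSkipSpaceL cs (idx - 1) = -1 := by
        apply pvSkipSpaceL_eq cs (idx - 1) (-1) (le_refl _) (by omega)
        · intro i hi1 hi2
          by_contra hcon
          obtain ⟨q, hqm, hqi⟩ := i6 i (by omega) (pvBoolFalse hcon)
          have := hall q hqm; omega
        · exact Or.inl rfl
      unfold pvTokenLeft
      rw [hj]; simp
    · have hj : pvSkipSpaceL cs (idx - 1) = idx - 1 := by
        rw [pvSkipSpaceL, dif_neg]; rintro ⟨hge, _⟩; omega
      unfold pvTokenLeft
      rw [hj, if_pos (by omega)]
  | some q =>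
    obtain ⟨hpq', as, bs, heq, hfail⟩ := List.find?_eq_some_iff_append.mp hf
    have hq1 : q.1 < idx := by simpa using hpq'
    have hfail' : ∀ a ∈ as, idx ≤ a.1 := by
      intro a ha; have := hfail a ha; simp at this; omega
    have hspans : pvTokenSpans cs = bs.reverse ++ q :: as.reverse := by
      have h2 := congrArg List.reverse heq
      simpa using h2
    have hqmem : q ∈ pvTokenSpans cs := by rw [hspans]; simp
    have hb := i1 q hqmem
    have hpwdec := List.pairwise_append.mp (hspans ▸ i2)
    have hcross : ∀ r ∈ bs.reverse, r.2 < q.1 := fun r hr => hpwdec.2.2 r hr q (by simp)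
    have hafter : ∀ r ∈ as.reverse, q.2 < r.1 := by
      have := List.pairwise_cons.mp hpwdec.2.1
      exact fun r hr => this.1 r hr
    set m := min q.2 idx with hm
    have hm1 : q.1 < m := by omega
    have hmn : m ≤ (cs.length : Int) := by have := hb.2.2; omega
    have hstep1 : pvSkipSpaceL cs (idx - 1) = m - 1 := by
      apply pvSkipSpaceL_eq cs (idx - 1) (m - 1) (by omega) (by omega)
      · intro i hi1 hi2
        by_contra hcon
        obtain ⟨r, hrm, hri⟩ := i6 i (by omega) (pvBoolFalse hcon)
        have hiq2 : q.2 ≤ (i : Int) := by omega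
        rw [hspans] at hrm
        rcases List.mem_append.mp hrm with hr | hr
        · have := hcross r hr; have := hb.2.1; omega
        · rcases List.mem_cons.mp hr with rfl | hr
          · omega
          · have := hafter r hr; have := hfail' r (by simpa using hr); omega
      · refine Or.inr ⟨by omega, ?_⟩
        have := i3 q hqmem (m - 1).toNat (by omega) (by omega)
        exact this
    have hstep2 : pvSkipNonSpaceL cs (m - 1) = q.1 - 1 := by
      apply pvSkipNonSpaceL_eq cs (m - 1) (q.1 - 1) (by omega) (by omega)
      · intro i hi1 hi2
        exact i3 q hqmem i (by omega) (by omega)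
      · rcases eq_or_lt_of_le hb.1 with h | h
        · exact Or.inl (by omega)
        · refine Or.inr ⟨by omega, ?_⟩
          exact i4 q hqmem (by omega)
    unfold pvTokenLeft
    rw [hstep1, if_neg (by omega), hstep2]
    have e1 : m - 1 + 1 = m := by ring
    have e2 : q.1 - 1 + 1 = q.1 := by ring
    rw [e1, e2]

theorem pvTokenRight_eq (cs : List Char) (hInv : pvInv cs) (idx : Int) (h0 : 0 ≤ idx) :
    pvTokenRight cs idx = (match (pvTokenSpans cs).find? (fun q => decide (idx < q.2)) with
      | none => (none, idx)
      | some q => (some (PySem.List.slice cs (some (max q.1 idx)) (some q.2)), q.2)) := by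
  obtain ⟨i1, i2, i3, i4, i5, i6, i7⟩ := hInv
  cases hf : (pvTokenSpans cs).find? (fun q => decide (idx < q.2)) with
  | none =>
    have hall : ∀ q ∈ pvTokenSpans cs, q.2 ≤ idx := by
      intro q hqm
      have := List.find?_eq_none.mp hf q hqm
      simp at this; omega
    by_cases hin : idx ≤ (cs.length : Int)
    · have hj : pvSkipSpaceR cs idx = (cs.length : Int) := by
        apply pvSkipSpaceR_eq cs idx _ h0 hin (le_refl _)
        · intro i hi1 hi2
          by_contra hcon
          obtain ⟨q, hqm, hqi⟩ := i6 i (by omega) (pvBoolFalse hcon)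
          have := hall q hqm; omega
        · exact Or.inl rfl
      unfold pvTokenRight
      rw [hj]; simp
    · have hj : pvSkipSpaceR cs idx = idx := by
        rw [pvSkipSpaceR, dif_neg]; rintro ⟨hlt, _⟩; omega
      unfold pvTokenRight
      rw [hj, if_pos (by omega)]
  | some q =>
    obtain ⟨hpq', as, bs, heq, hfail⟩ := List.find?_eq_some_iff_append.mp hf
    have hq2 : idx < q.2 := by simpa using hpq'
    have hfail' : ∀ a ∈ as, a.2 ≤ idx := by
      intro a ha; have := hfail a ha; simp at this; omega
    have hqmem : q ∈ pvTokenSpans cs := by rw [heq]; simp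
    have hb := i1 q hqmem
    have hpwdec := List.pairwise_append.mp (heq ▸ i2)
    have hbefore : ∀ r ∈ as, r.2 < q.1 := fun r hr => hpwdec.2.2 r hr q (by simp)
    have hafter : ∀ r ∈ bs, q.2 < r.1 := by
      have := List.pairwise_cons.mp hpwdec.2.1
      exact fun r hr => this.1 r hr
    set m := max q.1 idx with hm
    have hm1 : m < q.2 := by omega
    have hm0 : 0 ≤ m := by omega
    have hstep1 : pvSkipSpaceR cs idx = m := by
      apply pvSkipSpaceR_eq cs idx m h0 (by omega) (by have := hb.2.2; omega)
      · intro i hi1 hi2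
        by_contra hcon
        obtain ⟨r, hrm, hri⟩ := i6 i (by have := hb.2.2; omega) (pvBoolFalse hcon)
        have hiq1 : (i : Int) < q.1 := by omega
        rw [heq] at hrm
        rcases List.mem_append.mp hrm with hr | hr
        · have := hfail' r hr; omega
        · rcases List.mem_cons.mp hr with rfl | hr
          · omega
          · have := hafter r hr; omega
      · refine Or.inr ?_
        have := i3 q hqmem m.toNat (by omega) (by omega)
        simpa using this
    have hstep2 : pvSkipNonSpaceR cs m = q.2 := by
      apply pvSkipNonSpaceR_eq cs m q.2 hm0 (by omega) (by have := hb.2.2; omega)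
      · intro i hi1 hi2
        exact i3 q hqmem i (by omega) (by omega)
      · rcases eq_or_lt_of_le hb.2.2 with h | h
        · exact Or.inl h
        · refine Or.inr ?_
          have := i5 q hqmem h
          exact this
    unfold pvTokenRight
    rw [hstep1, if_neg (by omega), hstep2]


theorem pvSlice_ne (cs : List Char) (a b : Int) (h0 : 0 ≤ a) (hab : a < b)
    (hb : b ≤ (cs.length : Int)) :
    (PySem.List.slice cs (some a) (some b)).isEmpty = false := by
  rw [PySem.List.slice_toNat cs h0 (by omega)]
  have hlen : (List.take (b.toNat - a.toNat) (List.drop a.toNat cs)).length ≠ 0 := by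
    simp; omega
  cases hE : (List.take (b.toNat - a.toNat) (List.drop a.toNat cs)).isEmpty
  · rfl
  · exact absurd (List.isEmpty_iff_length_eq_zero.mp hE) hlen

theorem pvLeftWalk_cons (cs : List Char) (q : Int × Int) (rest : List (Int × Int)) (s : Int) :
    pvLeftWalk cs (q :: rest) s =
      (if q.1 ≥ s then pvLeftWalk cs rest s
       else if pvIsDigitLike (PySem.List.slice cs (some q.1) (some (min q.2 s))) then
         pvLeftWalk cs rest q.1
       else s) := by
  obtain ⟨a, b⟩ := q; rfl

theorem pvRightWalk_cons (cs : List Char) (q : Int × Int) (rest : List (Int × Int)) (e : Int) :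
    pvRightWalk cs (q :: rest) e =
      (if q.2 ≤ e then pvRightWalk cs rest e
       else if pvIsDigitLike (PySem.List.slice cs (some (max q.1 e)) (some q.2)) then
         pvRightWalk cs rest q.2
       else e) := by
  obtain ⟨a, b⟩ := q; rfl

theorem pvLeftWalk_skip (cs : List Char) (l₁ l₂ : List (Int × Int)) (s : Int)
    (h : ∀ y ∈ l₁, s ≤ y.1) :
    pvLeftWalk cs (l₁ ++ l₂) s = pvLeftWalk cs l₂ s := by
  induction l₁ with
  | nil => rfl
  | cons hd tl ihl =>
    rw [List.cons_append, pvLeftWalk_cons, if_pos (by have := h hd (by simp); omega)]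
    exact ihl (fun y hy => h y (by simp [hy]))

theorem pvRightWalk_skip (cs : List Char) (l₁ l₂ : List (Int × Int)) (e : Int)
    (h : ∀ y ∈ l₁, y.2 ≤ e) :
    pvRightWalk cs (l₁ ++ l₂) e = pvRightWalk cs l₂ e := by
  induction l₁ with
  | nil => rfl
  | cons hd tl ihl =>
    rw [List.cons_append, pvRightWalk_cons, if_pos (by have := h hd (by simp); omega)]
    exact ihl (fun y hy => h y (by simp [hy]))

theorem pvLeftWalk_stop (cs : List Char) (l : List (Int × Int)) (s : Int)
    (h : ∀ y ∈ l, s ≤ y.1) :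
    pvLeftWalk cs l s = s := by
  have := pvLeftWalk_skip cs l [] s h
  simpa using this

theorem pvRightWalk_stop (cs : List Char) (l : List (Int × Int)) (e : Int)
    (h : ∀ y ∈ l, y.2 ≤ e) :
    pvRightWalk cs l e = e := by
  have := pvRightWalk_skip cs l [] e h
  simpa using this

theorem pvLoopA_succ (cs : List Char) (f : Nat) (s e : Int) :
    pvLoopA cs (f + 1) s e =
      (if pvTokTruthyDigit (pvTokenLeft cs s).1 then pvLoopA cs f (pvTokenLeft cs s).2 e
       else if pvTokTruthyDigit (pvTokenRight cs e).1 then pvLoopA cs f s (pvTokenRight cs e).2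
       else (s, e)) := rfl

theorem pvSim (cs : List Char) (hInv : pvInv cs) :
    ∀ (fuel : Nat) (rs ss prs pss : List (Int × Int)) (s e : Int),
      (pvTokenSpans cs).reverse = prs ++ rs → (∀ y ∈ prs, s ≤ y.1) →
      pvTokenSpans cs = pss ++ ss → (∀ y ∈ pss, y.2 ≤ e) →
      s ≤ (cs.length : Int) → 0 ≤ e →
      rs.length + ss.length < fuel →
      pvLoopA cs fuel s e = (pvLeftWalk cs rs s, pvRightWalk cs ss e) := by
  intro fuel
  induction fuel with
  | zero => intro _ _ _ _ _ _ _ _ _ _ _ _ hf; omega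
  | succ f ih =>
    intro rs ss prs pss s e hrev hprs hss hpss hsn he0 hfuel
    have hF : (pvTokenSpans cs).reverse.find? (fun q => decide (q.1 < s)) =
        rs.find? (fun q => decide (q.1 < s)) := by
      rw [hrev, List.find?_append, List.find?_eq_none.mpr, Option.none_or]
      intro y hy; have := hprs y hy; simp; omega
    have hLL := pvTokenLeft_eq cs hInv s hsn
    rw [hF] at hLL
    cases hfind : rs.find? (fun q => decide (q.1 < s)) with
    | some q =>
      obtain ⟨hpq', as, bs, heqr, hfailr⟩ := List.find?_eq_some_iff_append.mp hfind
      have hq1s : q.1 < s := by simpa using hpq'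
      have hqmem : q ∈ pvTokenSpans cs := by
        rw [← List.mem_reverse, hrev, heqr]; simp
      have hb := hInv.1 q hqmem
      have hLL2 : pvTokenLeft cs s =
          (some (PySem.List.slice cs (some q.1) (some (min q.2 s))), q.1) := by
        rw [hLL, hfind]
      have htokne : (PySem.List.slice cs (some q.1) (some (min q.2 s))).isEmpty = false :=
        pvSlice_ne cs _ _ hb.1 (by omega) (by have := hb.2.2; omega)
      by_cases hd : pvIsDigitLike (PySem.List.slice cs (some q.1) (some (min q.2 s))) = true
      · have hT : pvTokTruthyDigit (pvTokenLeft cs s).1 = true := by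
          rw [hLL2]; simp [pvTokTruthyDigit, htokne, hd]
        have hwalk : pvLeftWalk cs rs s = pvLeftWalk cs bs q.1 := by
          rw [heqr, pvLeftWalk_skip cs as _ s
            (fun y hy => by have := hfailr y hy; simp at this; omega)]
          rw [pvLeftWalk_cons, if_neg (by omega), if_pos hd]
        rw [pvLoopA_succ, hT, if_pos rfl, hLL2]
        rw [hwalk]
        exact ih bs ss (prs ++ as ++ [q]) pss q.1 e
          (by rw [hrev, heqr]; simp)
          (by intro y hy
              simp at hy
              rcases hy with hy | hy | hy
              · have := hprs y hy; omega
              · have := hfailr y hy; simp at this; omega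
              · rw [hy])
          hss hpss (by have := hb.2.1; have := hb.2.2; omega) he0
          (by rw [heqr] at hfuel; simp at hfuel ⊢; omega)
      · have hdf : pvIsDigitLike (PySem.List.slice cs (some q.1) (some (min q.2 s))) = false :=
          pvBoolFalse hd
        have hLfail : pvTokTruthyDigit (pvTokenLeft cs s).1 = false := by
          rw [hLL2]; simp [pvTokTruthyDigit, htokne, hdf]
        have hwalkL : pvLeftWalk cs rs s = s := by
          rw [heqr, pvLeftWalk_skip cs as _ s
            (fun y hy => by have := hfailr y hy; simp at this; omega)]
          rw [pvLeftWalk_cons, if_neg (by omega), if_neg (by rw [hdf]; simp)]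

        have hG : (pvTokenSpans cs).find? (fun q => decide (e < q.2)) =
            ss.find? (fun q => decide (e < q.2)) := by
          rw [hss, List.find?_append, List.find?_eq_none.mpr, Option.none_or]
          intro y hy; have := hpss y hy; simp; omega
        have hRL := pvTokenRight_eq cs hInv e he0
        rw [hG] at hRL
        cases hgind : ss.find? (fun q => decide (e < q.2)) with
        | some r =>
          obtain ⟨hpr', cs1, ds, heqs, hfails⟩ := List.find?_eq_some_iff_append.mp hgind
          have hr2e : e < r.2 := by simpa using hpr'
          have hrmem : r ∈ pvTokenSpans cs := by rw [hss, heqs]; simp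
          have hrb := hInv.1 r hrmem
          have hRL2 : pvTokenRight cs e =
              (some (PySem.List.slice cs (some (max r.1 e)) (some r.2)), r.2) := by
            rw [hRL, hgind]
          have htokne2 : (PySem.List.slice cs (some (max r.1 e)) (some r.2)).isEmpty = false :=
            pvSlice_ne cs _ _ (by omega) (by omega) hrb.2.2
          by_cases hd2 : pvIsDigitLike (PySem.List.slice cs (some (max r.1 e)) (some r.2)) = true
          · have hT2 : pvTokTruthyDigit (pvTokenRight cs e).1 = true := by
              rw [hRL2]; simp [pvTokTruthyDigit, htokne2, hd2]
            have hwalkR : pvRightWalk cs ss e = pvRightWalk cs ds r.2 := by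
              rw [heqs, pvRightWalk_skip cs cs1 _ e
                (fun y hy => by have := hfails y hy; simp at this; omega)]
              rw [pvRightWalk_cons, if_neg (by omega), if_pos hd2]
            rw [pvLoopA_succ, hLfail, if_neg (by simp), hT2, if_pos rfl, hRL2]
            rw [hwalkR]
            exact ih rs ds prs (pss ++ cs1 ++ [r]) s r.2
              hrev hprs
              (by rw [hss, heqs]; simp)
              (by intro y hy
                  simp at hy
                  rcases hy with hy | hy | hy
                  · have := hpss y hy; omega
                  · have := hfails y hy; simp at this; omega
                  · rw [hy])
              hsn (by omega)
              (by rw [heqs] at hfuel; simp at hfuel ⊢; omega)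
          · have hd2f : pvIsDigitLike (PySem.List.slice cs (some (max r.1 e)) (some r.2)) = false :=
              pvBoolFalse hd2
            have hT2 : pvTokTruthyDigit (pvTokenRight cs e).1 = false := by
              rw [hRL2]; simp [pvTokTruthyDigit, htokne2, hd2f]
            have hwalkR : pvRightWalk cs ss e = e := by
              rw [heqs, pvRightWalk_skip cs cs1 _ e
                (fun y hy => by have := hfails y hy; simp at this; omega)]
              rw [pvRightWalk_cons, if_neg (by omega), if_neg (by rw [hd2f]; simp)]
            rw [pvLoopA_succ, hLfail, if_neg (by simp), hT2, if_neg (by simp), hwalkL, hwalkR]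
        | none =>
          have hRL2 : pvTokenRight cs e = (none, e) := by rw [hRL, hgind]
          have hT2 : pvTokTruthyDigit (pvTokenRight cs e).1 = false := by
            rw [hRL2]; rfl
          have hwalkR : pvRightWalk cs ss e = e := by
            apply pvRightWalk_stop
            intro y hy
            have := List.find?_eq_none.mp hgind y hy; simp at this; omega
          rw [pvLoopA_succ, hLfail, if_neg (by simp), hT2, if_neg (by simp), hwalkL, hwalkR]
    | none =>
      have hLL2 : pvTokenLeft cs s = (none, s) := by rw [hLL, hfind]
      have hLfail : pvTokTruthyDigit (pvTokenLeft cs s).1 = false := by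
        rw [hLL2]; rfl
      have hwalkL : pvLeftWalk cs rs s = s := by
        apply pvLeftWalk_stop
        intro y hy
        have := List.find?_eq_none.mp hfind y hy; simp at this; omega

      have hG : (pvTokenSpans cs).find? (fun q => decide (e < q.2)) =
          ss.find? (fun q => decide (e < q.2)) := by
        rw [hss, List.find?_append, List.find?_eq_none.mpr, Option.none_or]
        intro y hy; have := hpss y hy; simp; omega
      have hRL := pvTokenRight_eq cs hInv e he0
      rw [hG] at hRL
      cases hgind : ss.find? (fun q => decide (e < q.2)) with
      | some r =>
        obtain ⟨hpr', cs1, ds, heqs, hfails⟩ := List.find?_eq_some_iff_append.mp hgind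
        have hr2e : e < r.2 := by simpa using hpr'
        have hrmem : r ∈ pvTokenSpans cs := by rw [hss, heqs]; simp
        have hrb := hInv.1 r hrmem
        have hRL2 : pvTokenRight cs e =
            (some (PySem.List.slice cs (some (max r.1 e)) (some r.2)), r.2) := by
          rw [hRL, hgind]
        have htokne2 : (PySem.List.slice cs (some (max r.1 e)) (some r.2)).isEmpty = false :=
          pvSlice_ne cs _ _ (by omega) (by omega) hrb.2.2
        by_cases hd2 : pvIsDigitLike (PySem.List.slice cs (some (max r.1 e)) (some r.2)) = true
        · have hT2 : pvTokTruthyDigit (pvTokenRight cs e).1 = true := by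
            rw [hRL2]; simp [pvTokTruthyDigit, htokne2, hd2]
          have hwalkR : pvRightWalk cs ss e = pvRightWalk cs ds r.2 := by
            rw [heqs, pvRightWalk_skip cs cs1 _ e
              (fun y hy => by have := hfails y hy; simp at this; omega)]
            rw [pvRightWalk_cons, if_neg (by omega), if_pos hd2]
          rw [pvLoopA_succ, hLfail, if_neg (by simp), hT2, if_pos rfl, hRL2]
          rw [hwalkR]
          exact ih rs ds prs (pss ++ cs1 ++ [r]) s r.2
            hrev hprs
            (by rw [hss, heqs]; simp)
            (by intro y hy
                simp at hy
                rcases hy with hy | hy | hy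
                · have := hpss y hy; omega
                · have := hfails y hy; simp at this; omega
                · rw [hy])
            hsn (by omega)
            (by rw [heqs] at hfuel; simp at hfuel ⊢; omega)
        · have hd2f : pvIsDigitLike (PySem.List.slice cs (some (max r.1 e)) (some r.2)) = false :=
            pvBoolFalse hd2
          have hT2 : pvTokTruthyDigit (pvTokenRight cs e).1 = false := by
            rw [hRL2]; simp [pvTokTruthyDigit, htokne2, hd2f]
          have hwalkR : pvRightWalk cs ss e = e := by
            rw [heqs, pvRightWalk_skip cs cs1 _ e
              (fun y hy => by have := hfails y hy; simp at this; omega)]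
            rw [pvRightWalk_cons, if_neg (by omega), if_neg (by rw [hd2f]; simp)]
          rw [pvLoopA_succ, hLfail, if_neg (by simp), hT2, if_neg (by simp), hwalkL, hwalkR]
      | none =>
        have hRL2 : pvTokenRight cs e = (none, e) := by rw [hRL, hgind]
        have hT2 : pvTokTruthyDigit (pvTokenRight cs e).1 = false := by
          rw [hRL2]; rfl
        have hwalkR : pvRightWalk cs ss e = e := by
          apply pvRightWalk_stop
          intro y hy
          have := List.find?_eq_none.mp hgind y hy; simp at this; omega
        rw [pvLoopA_succ, hLfail, if_neg (by simp), hT2, if_neg (by simp), hwalkL, hwalkR]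

-- ===== VERDICT (by name: the statement is the Claim_ definition above) =====
theorem expand_numeric_span_spec : Claim_equal_expand_numeric_span := by
  intro text start end_ hDom hPre
  obtain ⟨hsn, he0⟩ := hPre
  have hInv := (pvInv_all text.toList).1
  have hlen := hInv.2.2.2.2.2.2
  unfold Spec_expand_numeric_span expand_numeric_span expand_numeric_span_alt
  exact pvSim text.toList hInv (2 * text.toList.length + 3)
    (pvTokenSpans text.toList).reverse (pvTokenSpans text.toList) [] [] start end_
    (by simp) (by simp) (by simp) (by simp) hsn he0
    (by rw [List.length_reverse]; omega)
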